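-- pv_equiv track=rewrite | github.com/TheNitromeFan/baekjoon | 07550.py | final_word
-- ===== SOURCE A (Python) =====
-- def final_word(dest, words, threshold, idx):
--     if threshold <= idx < len(words):
--         return words[idx]
--     elif idx >= len(words):
--         return "-outside-"
--     elif idx in dest:
--         return dest[idx]
--     dest[idx] = final_word(dest, words, threshold, idx + len(words[idx]))
--     return dest[idx]
-- ===== SOURCE B (Python) =====
-- def final_word(dest, words, threshold, idx):
--     path = []
--     cur = idx
--     while cur < threshold and cur < len(words) and cur not in dest:
--         path.append(cur)
--         cur += len(words[cur])
--     if threshold <= cur < len(words):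
--         value = words[cur]
--     elif cur >= len(words):
--         value = "-outside-"
--     else:
--         value = dest[cur]
--     for i in reversed(path):
--         dest[i] = value
--     return value
-- ===== Notes on version B (the rewrite author's own statement) =====
-- stated objective: alternative
-- what changed: Replaces A's memoized recursion (value computed on the unwind, one dict write per stack frame) by an explicit iterative walk that first follows the jump chain to its terminal index, then computes the result value once and assigns it to every visited index.
-- outside the precondition, e.g. on final_word({}, ['abc', ''], 10, 0): A returns '-outside-', B returns '-outside-'
import Mathlib
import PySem

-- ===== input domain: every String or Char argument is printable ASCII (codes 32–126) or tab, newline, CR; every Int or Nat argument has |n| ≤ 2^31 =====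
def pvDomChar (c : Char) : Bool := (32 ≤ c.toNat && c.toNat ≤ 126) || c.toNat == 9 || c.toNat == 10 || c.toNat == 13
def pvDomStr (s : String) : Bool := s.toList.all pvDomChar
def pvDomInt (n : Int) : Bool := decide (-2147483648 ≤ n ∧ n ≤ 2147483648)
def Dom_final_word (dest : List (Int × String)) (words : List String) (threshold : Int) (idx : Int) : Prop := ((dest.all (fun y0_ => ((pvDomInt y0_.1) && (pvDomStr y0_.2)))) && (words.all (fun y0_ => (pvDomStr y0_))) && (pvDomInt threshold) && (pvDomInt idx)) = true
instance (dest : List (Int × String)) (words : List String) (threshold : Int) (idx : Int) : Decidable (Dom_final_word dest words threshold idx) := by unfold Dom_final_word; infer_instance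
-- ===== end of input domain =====

-- B replaces A's memoized recursion by an explicit iterative walk to the terminal index followed by one
-- value computation (objective: alternative decomposition; same asymptotic cost). Both Pythons mutate the
-- dict `dest` identically (same keys, same value); the Lean equivalence is about the RETURN value only.

-- dict lookup on the association list: first match (Python dict has unique keys); shared tiny helper
def lookupDest (dest : List (Int × String)) (k : Int) : Option String :=
  (dest.find? (fun p => p.1 == k)).map (·.2)

-- ===== PORT A =====
-- A's recursion, made total by a fuel argument; fuel 2*len(words)+1 is never exhausted inside Pre_
-- (each recursive step strictly increases idx, which stays in [-len, len) while recursing).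
def finalWordA (dest : List (Int × String)) (words : List String) (threshold : Int) : Nat → Int → String
  | 0, _ => ""          -- unreachable inside Pre_ (nontermination / RecursionError in Python)
  | fuel+1, idx =>
    if threshold ≤ idx ∧ idx < (words.length : Int) then
      (PySem.List.pyGet? words idx).getD ""           -- words[idx]
    else if (words.length : Int) ≤ idx then "-outside-"
    else
      match lookupDest dest idx with
      | some v => v                                   -- idx in dest → dest[idx]
      | none =>
        match PySem.List.pyGet? words idx with
        | some w => finalWordA dest words threshold fuel (idx + PySem.Str.len w)
        | none => ""    -- IndexError in Python; excluded by Pre_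

def final_word (dest : List (Int × String)) (words : List String) (threshold : Int) (idx : Int) : String :=
  finalWordA dest words threshold (2 * words.length + 1) idx

-- ===== PORT B =====
-- the while-loop of B: advance cur while it is neither terminal nor cached (fuel as above)
def fwLoop (dest : List (Int × String)) (words : List String) (threshold : Int) : Nat → Int → Int
  | 0, cur => cur       -- unreachable inside Pre_
  | fuel+1, cur =>
    if cur < threshold ∧ cur < (words.length : Int) ∧ (lookupDest dest cur).isNone then
      match PySem.List.pyGet? words cur with
      | some w => fwLoop dest words threshold fuel (cur + PySem.Str.len w)
      | none => cur     -- IndexError in Python; excluded by Pre_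
    else cur

-- B's single value computation at the final index
def fwFinish (dest : List (Int × String)) (words : List String) (threshold : Int) (cur : Int) : String :=
  if threshold ≤ cur ∧ cur < (words.length : Int) then (PySem.List.pyGet? words cur).getD ""
  else if (words.length : Int) ≤ cur then "-outside-"
  else (lookupDest dest cur).getD ""    -- cur is in dest here whenever the loop exited normally

def final_word_alt (dest : List (Int × String)) (words : List String) (threshold : Int) (idx : Int) : String :=
  fwFinish dest words threshold (fwLoop dest words threshold (2 * words.length + 1) idx)

-- ===== PRECONDITION & SPEC =====
-- Pre_ excludes exactly the inputs on which A raises — idx below -len(words) so that words[idx] raises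
-- IndexError, or an uncached empty word at a position in [idx, min(threshold, len(words))) on which the
-- jump chain can stall (RecursionError) — except that the stall exclusion slightly over-approximates:
-- an uncached empty word in that window which the chain happens to jump over is also excluded although
-- A returns there (and B agrees); see the cite in claim.json.
def Pre_final_word (dest : List (Int × String)) (words : List String) (threshold : Int) (idx : Int) : Prop :=
  (idx < threshold ∧ idx < (words.length : Int) ∧ (lookupDest dest idx).isSome = true) ∨
  (-(words.length : Int) ≤ idx ∧
    ∀ j ∈ PySem.List.pyRange idx (min threshold (words.length : Int)) 1,
      (lookupDest dest j).isNone = true → PySem.List.pyGet? words j ≠ some "")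
instance (dest : List (Int × String)) (words : List String) (threshold : Int) (idx : Int) : Decidable (Pre_final_word dest words threshold idx) := by unfold Pre_final_word; infer_instance

def pvWitness_final_word : (List (Int × String)) × List String × Int × Int := ([(3, "zz")], ["ab", "cd"], 5, 0)

def Spec_final_word (dest : List (Int × String)) (words : List String) (threshold : Int) (idx : Int) (out : String) : Prop := out = final_word_alt dest words threshold idx
instance (dest : List (Int × String)) (words : List String) (threshold : Int) (idx : Int) (out : String) : Decidable (Spec_final_word dest words threshold idx out) := by unfold Spec_final_word; infer_instance

-- ===== CLAIM (what is proved, stated in full; the proofs are below) =====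
def Claim_equal_final_word : Prop := ∀ (dest : List (Int × String)) (words : List String) (threshold : Int) (idx : Int), Dom_final_word dest words threshold idx → Pre_final_word dest words threshold idx → Spec_final_word dest words threshold idx (final_word dest words threshold idx)

-- ===== LEMMAS AND PROOFS =====

lemma pyGet?_isSome_of_inrange (xs : List String) (i : Int)
    (h1 : -(xs.length : Int) ≤ i) (h2 : i < (xs.length : Int)) :
    ∃ w, PySem.List.pyGet? xs i = some w := by
  simp only [PySem.List.pyGet?, PySem.List.pyIdx?]
  by_cases h3 : 0 ≤ i
  · rw [if_pos h3, if_pos h2]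
    have hk : i.toNat < xs.length := by omega
    exact ⟨xs[i.toNat], by simp [List.getElem?_eq_getElem hk]⟩
  · rw [if_neg h3, if_pos h1]
    have hk : xs.length - (-i).toNat < xs.length := by omega
    exact ⟨xs[xs.length - (-i).toNat], by simp [List.getElem?_eq_getElem hk]⟩

lemma str_len_pos (s : String) (h : s ≠ "") : 0 < PySem.Str.len s := by
  have hl : s.toList ≠ [] := fun hnil => h (by rw [← String.ofList_toList (s := s), hnil])
  simp only [PySem.Str.len_eq, Int.natCast_pos]
  exact List.length_pos_iff.mpr hl

-- both programs' common terminal step: when the walk cannot continue at idx, A's branch chain at idx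
-- computes exactly fwFinish at idx
lemma terminal_step (dest : List (Int × String)) (words : List String) (threshold : Int) (f : Nat) (idx : Int)
    (hc : ¬ (idx < threshold ∧ idx < (words.length : Int) ∧ (lookupDest dest idx).isNone = true)) :
    finalWordA dest words threshold (f+1) idx = fwFinish dest words threshold idx := by
  simp only [finalWordA, fwFinish]
  split_ifs with h1 h2
  · rfl
  · rfl
  · push Not at h1
    rcases ho : lookupDest dest idx with _ | v
    · exact absurd ⟨by omega, by omega, by rw [ho]; rfl⟩ hc
    · rfl

-- main invariant: with enough fuel, A's recursion from any chain position cur ≥ idx equals B's loop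
-- followed by B's value computation; the Pre_ window hypothesis keeps every step strictly increasing
lemma key (dest : List (Int × String)) (words : List String) (threshold : Int) (idx : Int)
    (hNS : ∀ j ∈ PySem.List.pyRange idx (min threshold (words.length : Int)) 1,
      (lookupDest dest j).isNone = true → PySem.List.pyGet? words j ≠ some "") :
    ∀ (fuel : Nat) (cur : Int), idx ≤ cur → -(words.length : Int) ≤ cur →
    (words.length : Int) - cur < fuel → 0 < fuel →
    finalWordA dest words threshold fuel cur = fwFinish dest words threshold (fwLoop dest words threshold fuel cur) := by
  intro fuel
  induction fuel with
  | zero => intro cur _ hlo hf hpos; omega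
  | succ f ih =>
    intro cur hge hlo hf _
    by_cases hc : cur < threshold ∧ cur < (words.length : Int) ∧ (lookupDest dest cur).isNone = true
    · -- continue case
      obtain ⟨w, hw⟩ := pyGet?_isSome_of_inrange words cur hlo hc.2.1
      have hwne : w ≠ "" := by
        intro hemp
        refine hNS cur ?_ hc.2.2 (by rw [hw, hemp])
        rw [PySem.List.mem_pyRange_one]
        exact ⟨hge, lt_min hc.1 hc.2.1⟩
      have hwlen : 0 < PySem.Str.len w := str_len_pos w hwne
      have hA : finalWordA dest words threshold (f+1) cur
          = finalWordA dest words threshold f (cur + PySem.Str.len w) := by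
        simp only [finalWordA]
        rw [if_neg (by omega), if_neg (by omega)]
        rcases ho : lookupDest dest cur with _ | v
        · simp [hw]
        · rw [ho] at hc; simp at hc
      have hB : fwLoop dest words threshold (f+1) cur
          = fwLoop dest words threshold f (cur + PySem.Str.len w) := by
        simp only [fwLoop, if_pos hc, hw]
      rw [hA, hB]
      have hlt := hc.2.1
      exact ih (cur + PySem.Str.len w) (by omega) (by omega) (by omega) (by omega)
    · -- terminal case: the loop stops at cur and A's branch chain equals fwFinish there
      have hB : fwLoop dest words threshold (f+1) cur = cur := by
        simp only [fwLoop]; rw [if_neg hc]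
      rw [hB]
      exact terminal_step dest words threshold f cur hc

-- ===== VERDICT (by name: the statement is the Claim_ definition above) =====
theorem final_word_spec : Claim_equal_final_word := by
  intro dest words threshold idx _ hpre
  unfold Spec_final_word final_word final_word_alt
  rcases hpre with h | ⟨hlo, hNS⟩
  · -- start already cached in dest (and not in the terminal window): no step is taken
    have hc : ¬ (idx < threshold ∧ idx < (words.length : Int) ∧ (lookupDest dest idx).isNone = true) := by
      intro hcc
      rw [Option.isNone_iff_eq_none] at hcc
      rw [hcc.2.2] at h
      simp at h
    rw [show fwLoop dest words threshold (2*words.length+1) idx = idx from by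
          simp only [fwLoop]; rw [if_neg hc]]
    exact terminal_step dest words threshold (2*words.length) idx hc
  · -- general case: idx ≥ -len and no uncached empty word in the chain window; the fuel suffices
    exact key dest words threshold idx hNS (2*words.length+1) idx le_rfl hlo (by omega) (by omega)
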